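-- pv_equiv track=rewrite | github.com/luucamay/pythoning | codeforces/perform_the_combo.py | times_button_pressed2
-- ===== SOURCE A (Python) =====
-- def times_button_pressed2(n, m, combo, mistakes):
--     times_pressed = {}
--     for c in combo:
--         if c in times_pressed:
--             times_pressed[c] += 1
--         else:
--             times_pressed[c] = 1
--     for i in range(m):
--         p = mistakes[i]
--         for j in range(p):
--             button = combo[j]
--             times_pressed[button] += 1
--     nro_times = [0]*26
--     for c in times_pressed:
--         nro_times[ord(c) - 97] = times_pressed[c]
--     return nro_times
-- ===== SOURCE B (Python) =====
-- def times_button_pressed2(n, m, combo, mistakes):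
--     L = len(combo)
--     # count[p] = how many (positive) mistakes happened after pressing the first p buttons
--     count = [0] * (L + 1)
--     for i in range(m):
--         p = mistakes[i]
--         if p > 0:
--             count[p] += 1
--     # one forward pass: rem = number of mistakes that occur strictly after position j,
--     # so position j is pressed (1 + rem) times in total
--     rem = sum(count)
--     totals = {}
--     for j in range(L):
--         rem -= count[j]
--         c = combo[j]
--         totals[c] = totals.get(c, 0) + 1 + rem
--     nro_times = [0] * 26
--     for c in totals:
--         nro_times[ord(c) - 97] = totals[c]
--     return nro_times
-- ===== Notes on version B (the rewrite author's own statement) =====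
-- stated objective: alternative
-- what changed: Replaces the per-mistake rescan of the combo prefix (nested loops) by a counting array over mistake positions plus one forward pass that carries the number of still-pending mistakes, so each combo position is weighted 1+remaining in a single traversal.
import Mathlib
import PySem

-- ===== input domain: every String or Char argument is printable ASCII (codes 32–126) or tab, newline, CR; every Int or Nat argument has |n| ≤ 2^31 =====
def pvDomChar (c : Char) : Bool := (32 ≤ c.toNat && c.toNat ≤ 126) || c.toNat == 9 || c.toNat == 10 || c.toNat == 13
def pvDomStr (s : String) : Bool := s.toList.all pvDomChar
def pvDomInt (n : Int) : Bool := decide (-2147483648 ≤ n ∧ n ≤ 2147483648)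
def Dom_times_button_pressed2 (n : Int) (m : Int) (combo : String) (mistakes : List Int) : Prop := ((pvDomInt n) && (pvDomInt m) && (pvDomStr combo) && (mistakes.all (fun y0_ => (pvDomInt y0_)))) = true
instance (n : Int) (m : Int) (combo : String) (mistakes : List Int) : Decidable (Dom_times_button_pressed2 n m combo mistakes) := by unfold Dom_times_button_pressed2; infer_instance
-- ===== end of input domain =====

-- B replaces A's per-mistake rescan of the combo prefix by a counting array over
-- mistake positions and one weighted forward pass (objective: alternative single-pass algorithm).

-- ===== PORT A =====
def times_button_pressed2 (n : Int) (m : Int) (combo : String) (mistakes : List Int) : List Int :=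
  let tp0 : PySem.Dict Char Int :=
    combo.toList.foldl (fun d c =>
      if d.contains c then d.insert c (d.getD c 0 + 1) else d.insert c 1) PySem.Dict.empty
  let tp : PySem.Dict Char Int :=
    (PySem.List.pyRange 0 m 1).foldl (fun d i =>
      let p := PySem.List.pyGetD mistakes i 0
      (PySem.List.pyRange 0 p 1).foldl (fun d j =>
        let button := PySem.List.pyGetD combo.toList j ' '
        d.insert button (d.getD button 0 + 1)) d) tp0
  let nro := List.replicate 26 (0 : Int)
  tp.keys.foldl (fun nro c =>
    PySem.List.pySetD nro ((c.toNat : Int) - 97) (tp.getD c 0)) nro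

-- ===== PORT B =====
def times_button_pressed2_alt (n : Int) (m : Int) (combo : String) (mistakes : List Int) : List Int :=
  let L := combo.toList.length
  let count : List Int :=
    (PySem.List.pyRange 0 m 1).foldl (fun cnt i =>
      let p := PySem.List.pyGetD mistakes i 0
      if 0 < p then PySem.List.pySetD cnt p (PySem.List.pyGetD cnt p 0 + 1) else cnt)
      (List.replicate (L + 1) (0 : Int))
  let st : Int × PySem.Dict Char Int :=
    (PySem.List.pyRange 0 (L : Int) 1).foldl (fun st j =>
      let rem := st.1 - PySem.List.pyGetD count j 0
      let c := PySem.List.pyGetD combo.toList j ' '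
      (rem, st.2.insert c (st.2.getD c 0 + 1 + rem))) (count.sum, PySem.Dict.empty)
  let totals := st.2
  let nro := List.replicate 26 (0 : Int)
  totals.keys.foldl (fun nro c =>
    PySem.List.pySetD nro ((c.toNat : Int) - 97) (totals.getD c 0)) nro

-- ===== PRECONDITION & SPEC =====
-- Pre_ excludes exactly the inputs where Python A raises an IndexError: more loop
-- iterations than mistakes, a mistake position past the end of the combo, or a
-- character whose code is outside [71,122] (whose 26-slot index is out of range).
def Pre_times_button_pressed2 (n : Int) (m : Int) (combo : String) (mistakes : List Int) : Prop :=
  m ≤ (mistakes.length : Int) ∧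
  (∀ p ∈ mistakes.take m.toNat, p ≤ (combo.toList.length : Int)) ∧
  (combo.toList.all (fun c => 71 ≤ c.toNat && c.toNat ≤ 122)) = true
instance (n : Int) (m : Int) (combo : String) (mistakes : List Int) : Decidable (Pre_times_button_pressed2 n m combo mistakes) := by unfold Pre_times_button_pressed2; infer_instance

def pvWitness_times_button_pressed2 : Int × Int × String × List Int := (5, 2, "abcab", [1, 3])

def Spec_times_button_pressed2 (n : Int) (m : Int) (combo : String) (mistakes : List Int) (out : List Int) : Prop := out = times_button_pressed2_alt n m combo mistakes
instance (n : Int) (m : Int) (combo : String) (mistakes : List Int) (out : List Int) : Decidable (Spec_times_button_pressed2 n m combo mistakes out) := by unfold Spec_times_button_pressed2; infer_instance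

-- ===== CLAIM (what is proved, stated in full; the proofs are below) =====
def Claim_equal_times_button_pressed2 : Prop := ∀ (n : Int) (m : Int) (combo : String) (mistakes : List Int), Dom_times_button_pressed2 n m combo mistakes → Pre_times_button_pressed2 n m combo mistakes → Spec_times_button_pressed2 n m combo mistakes (times_button_pressed2 n m combo mistakes)
-- ===== LEMMAS AND PROOFS =====

-- weight of position j: number of effective mistakes strictly after it
def pvW (ps : List Int) (j : Nat) : Int := (ps.countP (fun p => decide ((j : Int) < p)) : Int)

-- common closed form for the per-character totals
def pvVal (cs : List Char) (ps : List Int) (c : Char) : Int :=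
  ((List.range cs.length).map (fun j => if cs[j]? = some c then 1 + pvW ps j else 0)).sum

-- range(b) indexed into xs is take
theorem pv_range_map_getD {α : Type} (xs : List α) (d : α) (b : Int) (hb : b ≤ (xs.length : Int)) :
    (PySem.List.pyRange 0 b 1).map (fun i => PySem.List.pyGetD xs i d) = xs.take b.toNat := by
  rcases le_or_gt b 0 with hb0 | hb0
  · rw [PySem.List.pyRange_one_eq_nil hb0]
    have h0 : b.toNat = 0 := by omega
    simp [h0]
  · rw [PySem.List.pyRange_one]
    have hble : b.toNat ≤ xs.length := by omega
    apply List.ext_getElem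
    · simp [hble]
    · intro i h1 h2
      simp only [List.map_map, List.getElem_map, List.getElem_range, Function.comp]
      have hi : i < xs.length := by
        simp [List.length_take] at h2; omega
      rw [List.getElem_take]
      rw [show ((0:Int) + (i:Int)) = ((i:Nat):Int) by omega]
      simp [PySem.List.pyGetD_natCast, List.getD_eq_getElem?_getD, hi]

-- count over a take, as a sum over all indices
theorem pv_take_count (cs : List Char) (p : Int) (c : Char) (hp : p ≤ (cs.length : Int)) :
    (((cs.take p.toNat).count c : Int)) =
      ((List.range cs.length).map (fun (j : Nat) => if cs[j]? = some c ∧ (j : Int) < p then (1:Int) else 0)).sum := by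
  induction cs generalizing p with
  | nil => simp
  | cons a cs ih =>
    rw [List.length_cons, List.range_succ_eq_map]
    simp only [List.map_cons, List.sum_cons, List.map_map, Function.comp_def,
      List.getElem?_cons_succ, List.getElem?_cons_zero, Nat.succ_eq_add_one, Nat.cast_zero]
    push_cast
    have hmap : (List.range cs.length).map
          (fun (j : Nat) => if cs[j]? = some c ∧ ((j : Int) + 1) < p then (1:Int) else 0)
        = (List.range cs.length).map
          (fun (j : Nat) => if cs[j]? = some c ∧ (j : Int) < p - 1 then (1:Int) else 0) := by
      apply List.map_congr_left
      intro j _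
      have hiff : ((j : Int) + 1 < p) ↔ ((j : Int) < p - 1) := by omega
      simp only [hiff]
    rw [hmap, ← ih (p - 1) (by simp at hp ⊢; omega)]
    rcases le_or_gt p 0 with hp0 | hp0
    · have h0 : p.toNat = 0 := by omega
      have h1 : (p - 1).toNat = 0 := by omega
      have h2 : ¬ ((0:Int) < p) := by omega
      simp [h0, h1, h2]
    · have h1 : p.toNat = (p - 1).toNat + 1 := by omega
      rw [h1, List.take_succ_cons, List.count_cons]
      have h2 : (0:Int) < p := hp0
      by_cases h : a = c <;> simp [h, beq_iff_eq, h2] <;> push_cast <;> ring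

theorem pv_count_eq_sum (cs : List Char) (c : Char) :
    ((cs.count c : Int)) =
      ((List.range cs.length).map (fun j => if cs[j]? = some c then (1:Int) else 0)).sum := by
  induction cs with
  | nil => simp
  | cons a cs ih =>
    rw [List.count_cons, List.length_cons, List.range_succ_eq_map]
    push_cast
    simp only [List.map_cons, List.sum_cons, List.map_map, Function.comp_def, List.getElem?_cons_succ,
      List.getElem?_cons_zero]
    rw [ih]
    by_cases h : a = c <;> simp [h, beq_iff_eq, add_comm] <;> rfl

theorem pv_sum_map_add (l : List Nat) (f g : Nat → Int) :
    (l.map (fun j => f j + g j)).sum = (l.map f).sum + (l.map g).sum := by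
  induction l with
  | nil => simp
  | cons a l ih => simp [ih]; ring

-- A's total for c equals the closed form
theorem pv_A_val (cs : List Char) (ps : List Int) (c : Char) (h : ∀ p ∈ ps, p ≤ (cs.length : Int)) :
    (cs.count c : Int) + (ps.map (fun p => ((cs.take p.toNat).count c : Int))).sum = pvVal cs ps c := by
  induction ps with
  | nil =>
    unfold pvVal pvW
    simp only [List.countP_nil, Nat.cast_zero, add_zero, List.map_nil, List.sum_nil]
    rw [pv_count_eq_sum]
  | cons p ps ih =>
    have hps : ∀ q ∈ ps, q ≤ (cs.length : Int) := fun q hq => h q (by simp [hq])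
    have hpt : ∀ j ∈ List.range cs.length,
        (fun (j : Nat) => if cs[j]? = some c then 1 + pvW (p :: ps) j else 0) j =
        (fun (j : Nat) => (if cs[j]? = some c then 1 + pvW ps j else 0)
          + (if cs[j]? = some c ∧ (j : Int) < p then (1:Int) else 0)) j := by
      intro j _
      dsimp only
      unfold pvW
      rw [List.countP_cons]
      by_cases h1 : cs[j]? = some c <;> by_cases h2 : (j : Int) < p <;>
        simp [h1, h2] <;> push_cast <;> ring
    unfold pvVal
    rw [List.map_congr_left hpt, pv_sum_map_add]
    unfold pvVal at ih
    rw [← ih hps, ← pv_take_count cs p c (h p (by simp))]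
    simp only [List.map_cons, List.sum_cons]
    ring

-- countP split at a value
theorem pv_countP_split (ps : List Int) (k : Int) :
    ps.countP (fun p => decide (k ≤ p ∧ 0 < p)) =
      ps.countP (fun p => decide (k + 1 ≤ p ∧ 0 < p)) + ps.countP (fun p => decide (p = k ∧ 0 < p)) := by
  induction ps with
  | nil => simp
  | cons p ps ih =>
    simp only [List.countP_cons, ih]
    split_ifs <;> (simp only [decide_eq_true_eq] at *) <;> omega

-- Set.update by already-present elements
theorem pv_update_of_subset {α : Type} [BEq α] [LawfulBEq α] (s : PySem.Set α) (xs : List α)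
    (h : ∀ x ∈ xs, x ∈ s) : PySem.Set.update s xs = s := by
  induction xs generalizing s with
  | nil => simp [PySem.Set.update]
  | cons x xs ih =>
    have hx : x ∈ s := h x (by simp)
    have : PySem.Set.add s x = s := by
      simp [PySem.Set.add, PySem.Set.contains, hx]
    simp only [PySem.Set.update, List.foldl_cons, this] at *
    exact ih _ (fun y hy => h y (by simp [hy]))

-- A, first loop: == counter
theorem pv_A1 (cs : List Char) :
    cs.foldl (fun d c => if d.contains c then d.insert c (d.getD c 0 + 1) else d.insert c 1)
        PySem.Dict.empty = PySem.Dict.counter cs := by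
  have hfun : (fun (d : PySem.Dict Char Int) c => if d.contains c then d.insert c (d.getD c 0 + 1) else d.insert c 1)
      = fun d c => d.insert c (d.getD c 0 + 1) := by
    funext d c
    by_cases h : d.contains c
    · simp [h]
    · simp [h, PySem.Dict.getD_of_not_contains d 0 (by simpa using h)]
  rw [hfun, PySem.Dict.foldl_insert_getD_add_one_eq_counter]

-- A, second loop: getD accumulates prefix counts, keys unchanged
theorem pv_A2_getD (cs : List Char) (mistakes : List Int) (l : List Int) (d : PySem.Dict Char Int) (c : Char)
    (h : ∀ i ∈ l, PySem.List.pyGetD mistakes i 0 ≤ (cs.length : Int)) :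
    (l.foldl (fun d i =>
        (PySem.List.pyRange 0 (PySem.List.pyGetD mistakes i 0) 1).foldl (fun d j =>
          d.insert (PySem.List.pyGetD cs j ' ') (d.getD (PySem.List.pyGetD cs j ' ') 0 + 1)) d) d).getD c 0
      = d.getD c 0 + (l.map (fun i => (((cs.take (PySem.List.pyGetD mistakes i 0).toNat).count c : Int)))).sum := by
  induction l generalizing d with
  | nil => simp
  | cons i l ih =>
    have hi : PySem.List.pyGetD mistakes i 0 ≤ (cs.length : Int) := h i (by simp)
    have hl : ∀ i' ∈ l, PySem.List.pyGetD mistakes i' 0 ≤ (cs.length : Int) :=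
      fun i' hi' => h i' (by simp [hi'])
    simp only [List.foldl_cons, List.map_cons, List.sum_cons]
    rw [ih _ hl]
    have hinner : ((PySem.List.pyRange 0 (PySem.List.pyGetD mistakes i 0) 1).foldl (fun d j =>
          d.insert (PySem.List.pyGetD cs j ' ') (d.getD (PySem.List.pyGetD cs j ' ') 0 + 1)) d).getD c 0
        = d.getD c 0 + ((cs.take (PySem.List.pyGetD mistakes i 0).toNat).count c : Int) := by
      rw [← List.foldl_map (f := fun j => PySem.List.pyGetD cs j ' ')
        (g := fun (d : PySem.Dict Char Int) x => d.insert x (d.getD x 0 + 1))]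
      rw [PySem.Dict.getD_foldl_insert_add_one]
      rw [pv_range_map_getD cs ' ' _ hi]
    rw [hinner]
    ring

theorem pv_A2_keys (cs : List Char) (mistakes : List Int) (l : List Int) (d : PySem.Dict Char Int)
    (h : ∀ i ∈ l, PySem.List.pyGetD mistakes i 0 ≤ (cs.length : Int))
    (hsub : ∀ c ∈ cs, c ∈ d.keys) :
    (l.foldl (fun d i =>
        (PySem.List.pyRange 0 (PySem.List.pyGetD mistakes i 0) 1).foldl (fun d j =>
          d.insert (PySem.List.pyGetD cs j ' ') (d.getD (PySem.List.pyGetD cs j ' ') 0 + 1)) d) d).keys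
      = d.keys := by
  induction l generalizing d with
  | nil => simp
  | cons i l ih =>
    simp only [List.foldl_cons]
    have hkeys : ((PySem.List.pyRange 0 (PySem.List.pyGetD mistakes i 0) 1).foldl (fun d j =>
          d.insert (PySem.List.pyGetD cs j ' ') (d.getD (PySem.List.pyGetD cs j ' ') 0 + 1)) d).keys
        = d.keys := by
      rw [← List.foldl_map (f := fun j => PySem.List.pyGetD cs j ' ')
        (g := fun (d : PySem.Dict Char Int) x => d.insert x (d.getD x 0 + 1))]
      rw [PySem.Dict.keys_foldl_insert]
      apply pv_update_of_subset
      intro x hx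
      rcases List.mem_map.mp hx with ⟨j, hj, rfl⟩
      rw [PySem.List.mem_pyRange_one] at hj
      have hjm : PySem.List.pyGetD cs j ' ' ∈ cs := by
        apply PySem.List.pyGetD_mem
        constructor <;> [omega; skip]
        calc j < PySem.List.pyGetD mistakes i 0 := hj.2
          _ ≤ (cs.length : Int) := h i (by simp)
      exact hsub _ hjm
    have step := ih _ (fun i' hi' => h i' (by simp [hi']))
      (fun c' hc' => by rw [hkeys]; exact hsub c' hc')
    rw [step, hkeys]

theorem pv_sum_set (xs : List Int) (i : Nat) (v : Int) (h : i < xs.length) :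
    (xs.set i v).sum = xs.sum + v - xs[i] := by
  rw [List.sum_set, if_pos h]
  have h2 : (xs.take i).sum + (xs.drop i).sum = xs.sum := List.sum_take_add_sum_drop xs i
  rw [List.drop_eq_getElem_cons h, List.sum_cons] at h2
  omega

-- B, count array characterization
theorem pv_B_count_getD (L : Nat) (ps : List Int) (cnt : List Int) (hlen : cnt.length = L + 1)
    (q : Int) (hq0 : 0 ≤ q) (hqL : q ≤ (L : Int)) (h : ∀ p ∈ ps, p ≤ (L : Int)) :
    PySem.List.pyGetD
        (ps.foldl (fun cnt p => if 0 < p then PySem.List.pySetD cnt p (PySem.List.pyGetD cnt p 0 + 1) else cnt) cnt)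
        q 0
      = PySem.List.pyGetD cnt q 0 + (ps.countP (fun p => decide (p = q ∧ 0 < p)) : Int) := by
  induction ps generalizing cnt with
  | nil => simp
  | cons p ps ih =>
    have hp : p ≤ (L : Int) := h p (by simp)
    have hps : ∀ p' ∈ ps, p' ≤ (L : Int) := fun p' hp' => h p' (by simp [hp'])
    simp only [List.foldl_cons]
    by_cases hpos : 0 < p
    · rw [if_pos hpos]
      have hlen' : (PySem.List.pySetD cnt p (PySem.List.pyGetD cnt p 0 + 1)).length = L + 1 := by
        rw [PySem.List.length_pySetD, hlen]
      rw [ih _ hlen' hps]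
      have e1 : ((p.toNat : Nat) : Int) = p := Int.toNat_of_nonneg (by omega)
      have e2 : ((q.toNat : Nat) : Int) = q := Int.toNat_of_nonneg hq0
      have hple : p.toNat < cnt.length := by omega
      have hrw : PySem.List.pyGetD (PySem.List.pySetD cnt p (PySem.List.pyGetD cnt p 0 + 1)) q 0
          = if q.toNat = p.toNat then PySem.List.pyGetD cnt p 0 + 1
            else PySem.List.pyGetD cnt q 0 := by
        rw [← e1, ← e2, PySem.List.pyGetD_pySetD_natCast cnt p.toNat q.toNat _ 0 hple]
        simp only [Int.toNat_natCast]
        rfl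
      rw [hrw, List.countP_cons]
      by_cases heq : q.toNat = p.toNat
      · rw [if_pos heq, if_pos (show decide (p = q ∧ 0 < p) = true by
          simp only [decide_eq_true_eq]; omega)]
        have hpq : p = q := by omega
        rw [hpq]
        push_cast
        ring
      · rw [if_neg heq, if_neg (show ¬ decide (p = q ∧ 0 < p) = true by
          simp only [decide_eq_true_eq]; omega)]
        push_cast
        ring
    · rw [if_neg hpos, ih _ hlen hps, List.countP_cons,
        if_neg (by simp; omega)]
      push_cast
      ring

theorem pv_B_count_len (L : Nat) (ps : List Int) (cnt : List Int) (hlen : cnt.length = L + 1) :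
    (ps.foldl (fun cnt p => if 0 < p then PySem.List.pySetD cnt p (PySem.List.pyGetD cnt p 0 + 1) else cnt) cnt).length = L + 1 := by
  induction ps generalizing cnt with
  | nil => simpa using hlen
  | cons p ps ih =>
    simp only [List.foldl_cons]
    by_cases hpos : 0 < p
    · rw [if_pos hpos]
      exact ih _ (by rw [PySem.List.length_pySetD, hlen])
    · rw [if_neg hpos]
      exact ih _ hlen

theorem pv_B_count_sum (L : Nat) (ps : List Int) (cnt : List Int) (hlen : cnt.length = L + 1)
    (h : ∀ p ∈ ps, p ≤ (L : Int)) :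
    (ps.foldl (fun cnt p => if 0 < p then PySem.List.pySetD cnt p (PySem.List.pyGetD cnt p 0 + 1) else cnt) cnt).sum
      = cnt.sum + (ps.countP (fun p => decide (0 < p)) : Int) := by
  induction ps generalizing cnt with
  | nil => simp
  | cons p ps ih =>
    have hp : p ≤ (L : Int) := h p (by simp)
    have hps : ∀ p' ∈ ps, p' ≤ (L : Int) := fun p' hp' => h p' (by simp [hp'])
    simp only [List.foldl_cons, List.countP_cons]
    by_cases hpos : 0 < p
    · rw [if_pos hpos]
      have hlen' : (PySem.List.pySetD cnt p (PySem.List.pyGetD cnt p 0 + 1)).length = L + 1 := by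
        rw [PySem.List.length_pySetD, hlen]
      rw [ih _ hlen' hps]
      have hple : p.toNat < cnt.length := by omega
      rw [PySem.List.pySetD_of_nonneg cnt _ (by omega), pv_sum_set cnt p.toNat _ hple]
      rw [PySem.List.pyGetD_eq_getElem cnt 0 (by omega) (by omega)]
      rw [if_pos (by simpa using hpos)]
      push_cast
      ring
    · rw [if_neg hpos, ih _ hlen hps, if_neg (by simpa using hpos)]
      push_cast
      ring

-- B, main fold invariant
theorem pv_B_inv (cs : List Char) (ps : List Int) (count : List Int)
    (hcl : count.length = cs.length + 1)
    (hcg : ∀ q : Int, 0 ≤ q → q ≤ (cs.length : Int) →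
      PySem.List.pyGetD count q 0 = (ps.countP (fun p => decide (p = q ∧ 0 < p)) : Int))
    (hsum : count.sum = (ps.countP (fun p => decide (0 < p)) : Int))
    (k : Nat) (hk : k ≤ cs.length) :
    (((PySem.List.pyRange 0 (k : Int) 1).foldl (fun st j =>
        let rem := st.1 - PySem.List.pyGetD count j 0
        let c := PySem.List.pyGetD cs j ' '
        (rem, st.2.insert c (st.2.getD c 0 + 1 + rem)))
        (count.sum, (PySem.Dict.empty : PySem.Dict Char Int))).1
        = (ps.countP (fun p => decide ((k : Int) ≤ p ∧ 0 < p)) : Int))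
    ∧ (((PySem.List.pyRange 0 (k : Int) 1).foldl (fun st j =>
        let rem := st.1 - PySem.List.pyGetD count j 0
        let c := PySem.List.pyGetD cs j ' '
        (rem, st.2.insert c (st.2.getD c 0 + 1 + rem)))
        (count.sum, (PySem.Dict.empty : PySem.Dict Char Int))).2.keys
        = PySem.Set.ofList (cs.take k))
    ∧ (∀ c : Char, ((PySem.List.pyRange 0 (k : Int) 1).foldl (fun st j =>
        let rem := st.1 - PySem.List.pyGetD count j 0
        let c := PySem.List.pyGetD cs j ' '
        (rem, st.2.insert c (st.2.getD c 0 + 1 + rem)))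
        (count.sum, (PySem.Dict.empty : PySem.Dict Char Int))).2.getD c 0
        = ((List.range k).map (fun j => if cs[j]? = some c then 1 + pvW ps j else 0)).sum) := by
  induction k with
  | zero =>
    rw [show ((0 : Nat) : Int) = 0 by norm_num, PySem.List.pyRange_one_eq_nil (by norm_num)]
    refine ⟨?_, by simp, by intro c; simp⟩
    simp only [List.foldl_nil]
    rw [hsum]
    congr 1
    apply List.countP_congr
    intro p _
    simp only [decide_eq_true_eq]
    omega
  | succ k ihk =>
    have hklen : k < cs.length := by omega
    obtain ⟨ih1, ih2, ih3⟩ := ihk (by omega)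
    have hsplit : ((k + 1 : Nat) : Int) = (k : Int) + 1 := by push_cast; ring
    rw [hsplit, PySem.List.pyRange_one_succ_right (by positivity), List.foldl_append,
      List.foldl_cons, List.foldl_nil]
    set prev := (PySem.List.pyRange 0 (k : Int) 1).foldl (fun st j =>
        let rem := st.1 - PySem.List.pyGetD count j 0
        let c := PySem.List.pyGetD cs j ' '
        (rem, st.2.insert c (st.2.getD c 0 + 1 + rem)))
        (count.sum, (PySem.Dict.empty : PySem.Dict Char Int)) with hprev
    have hck : PySem.List.pyGetD cs (k : Int) ' ' = cs[k] := by
      rw [PySem.List.pyGetD_eq_getElem cs ' ' (by positivity) (by exact_mod_cast hklen)]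
      simp
    have hcountk : PySem.List.pyGetD count (k : Int) 0
        = (ps.countP (fun p => decide (p = (k : Int) ∧ 0 < p)) : Int) :=
      hcg (k : Int) (by positivity) (by exact_mod_cast le_of_lt hklen)
    have hrem : prev.1 - PySem.List.pyGetD count (k : Int) 0
        = (ps.countP (fun p => decide ((k : Int) + 1 ≤ p ∧ 0 < p)) : Int) := by
      rw [ih1, hcountk]
      have hs := pv_countP_split ps (k : Int)
      have hc2 : ps.countP (fun p => decide ((k : Int) ≤ p ∧ 0 < p))
          = ps.countP (fun p => decide (p = (k : Int) ∧ 0 < p))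
            + ps.countP (fun p => decide ((k : Int) + 1 ≤ p ∧ 0 < p)) := by omega
      omega
    dsimp only
    refine ⟨?_, ?_, ?_⟩
    · rw [hrem]
    · have htake : cs.take (k + 1) = cs.take k ++ [cs[k]] := by
        rw [List.take_add_one, List.getElem?_eq_getElem hklen]
        rfl
      have hofl : PySem.Set.ofList (cs.take k ++ [cs[k]])
          = PySem.Set.add (PySem.Set.ofList (cs.take k)) cs[k] := by
        rw [PySem.Set.ofList_eq_foldl, PySem.Set.ofList_eq_foldl, List.foldl_append,
          List.foldl_cons, List.foldl_nil]
      rw [htake, hofl, hck]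
      by_cases hc : prev.2.contains cs[k]
      · rw [PySem.Dict.keys_insert_of_contains _ _ hc, ih2]
        have hmem : cs[k] ∈ PySem.Set.ofList (cs.take k) := by
          rw [← ih2, ← PySem.Dict.contains_iff_mem_keys]
          exact hc
        simp [PySem.Set.add, PySem.Set.contains, hmem]
      · rw [PySem.Dict.keys_insert_of_not_contains _ _ (by simpa using hc), ih2]
        have hmem : cs[k] ∉ PySem.Set.ofList (cs.take k) := by
          rw [← ih2, ← PySem.Dict.contains_iff_mem_keys]
          simpa using hc
        simp [PySem.Set.add, PySem.Set.contains, hmem]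
    · intro c'
      rw [List.range_succ, List.map_append, List.sum_append, ← ih3 c']
      simp only [List.map_cons, List.map_nil, List.sum_cons, List.sum_nil]
      rw [PySem.Dict.getD_insert, hck]
      by_cases hc : c' = cs[k]
      · subst hc
        rw [if_pos rfl, List.getElem?_eq_getElem hklen, if_pos rfl, ih3 cs[k], hrem]
        have hw : pvW ps k = (ps.countP (fun p => decide ((k : Int) + 1 ≤ p ∧ 0 < p)) : Int) := by
          unfold pvW
          congr 1
          apply List.countP_congr
          intro p _
          simp only [decide_eq_true_eq]
          omega
        rw [hw]
        ring
      · rw [if_neg hc, List.getElem?_eq_getElem hklen,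
          if_neg (by simp only [Option.some.injEq]; exact fun h => hc h.symm)]
        ring

theorem pv_out_congr (d1 d2 : PySem.Dict Char Int) (h : d1 = d2) :
    d1.keys.foldl (fun nro c =>
        PySem.List.pySetD nro ((c.toNat : Int) - 97) (d1.getD c 0)) (List.replicate 26 (0 : Int))
      = d2.keys.foldl (fun nro c =>
        PySem.List.pySetD nro ((c.toNat : Int) - 97) (d2.getD c 0)) (List.replicate 26 (0 : Int)) := by
  rw [h]

theorem pv_dict_eq (d1 d2 : PySem.Dict Char Int) (hk : d1.keys = d2.keys)
    (hnd : d1.keys.Nodup) (hv : ∀ c, d1.getD c 0 = d2.getD c 0) : d1 = d2 := by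
  apply PySem.Dict.ext
  rw [PySem.Dict.items_eq_map_keys d1 hnd 0, PySem.Dict.items_eq_map_keys d2 (hk ▸ hnd) 0, hk]
  apply List.map_congr_left
  intro k _
  rw [hv k]

-- ===== VERDICT (by name: the statement is the Claim_ definition above) =====
theorem times_button_pressed2_spec : Claim_equal_times_button_pressed2 := by
  intro n m combo mistakes _hdom hpre
  obtain ⟨hm, hmk, _hchar⟩ := hpre
  unfold Spec_times_button_pressed2 times_button_pressed2 times_button_pressed2_alt
  dsimp only
  apply pv_out_congr
  rw [pv_A1 combo.toList]
  -- shared notation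
  have hran : ∀ i ∈ PySem.List.pyRange 0 m 1,
      PySem.List.pyGetD mistakes i 0 ≤ (combo.toList.length : Int) := by
    intro i hi
    rw [PySem.List.mem_pyRange_one] at hi
    have hilt : i < (mistakes.length : Int) := lt_of_lt_of_le hi.2 hm
    apply hmk
    rw [PySem.List.pyGetD_eq_getElem mistakes 0 hi.1 hilt]
    have hidx : i.toNat < (mistakes.take m.toNat).length := by
      rw [List.length_take]
      omega
    have : mistakes[i.toNat] = (mistakes.take m.toNat)[i.toNat] := (List.getElem_take).symm
    rw [this]
    exact List.getElem_mem hidx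
  -- the effective mistake list
  have hconv : (PySem.List.pyRange 0 m 1).map (fun i => PySem.List.pyGetD mistakes i 0)
      = mistakes.take m.toNat := pv_range_map_getD mistakes 0 m hm
  -- A side
  have hA1 := pv_A1 combo.toList
  have hAkeys := pv_A2_keys combo.toList mistakes (PySem.List.pyRange 0 m 1)
    (combo.toList.foldl (fun d c =>
      if d.contains c then d.insert c (d.getD c 0 + 1) else d.insert c 1) PySem.Dict.empty)
    hran
    (by
      intro c hc
      rw [hA1, PySem.Dict.keys_counter]
      exact (PySem.Set.mem_ofList _ _).mpr hc)
  rw [hA1, PySem.Dict.keys_counter] at hAkeys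
  have hAval : ∀ c, ((PySem.List.pyRange 0 m 1).foldl (fun d i =>
        (PySem.List.pyRange 0 (PySem.List.pyGetD mistakes i 0) 1).foldl (fun d j =>
          d.insert (PySem.List.pyGetD combo.toList j ' ')
            (d.getD (PySem.List.pyGetD combo.toList j ' ') 0 + 1)) d)
        (PySem.Dict.counter combo.toList)).getD c 0
      = pvVal combo.toList (mistakes.take m.toNat) c := by
    intro c
    rw [pv_A2_getD combo.toList mistakes _ _ c hran, PySem.Dict.getD_counter]
    have hmapconv : (PySem.List.pyRange 0 m 1).map
          (fun i => (((combo.toList.take (PySem.List.pyGetD mistakes i 0).toNat).count c : Int)))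
        = (mistakes.take m.toNat).map (fun p => (((combo.toList.take p.toNat).count c : Int))) := by
      rw [← hconv, List.map_map]
      rfl
    rw [hmapconv]
    exact pv_A_val combo.toList (mistakes.take m.toNat) c hmk
  -- B side: the count array
  have hcntconv : (PySem.List.pyRange 0 m 1).foldl (fun cnt i =>
        if 0 < PySem.List.pyGetD mistakes i 0 then
          PySem.List.pySetD cnt (PySem.List.pyGetD mistakes i 0)
            (PySem.List.pyGetD cnt (PySem.List.pyGetD mistakes i 0) 0 + 1)
        else cnt) (List.replicate (combo.toList.length + 1) (0 : Int))
      = (mistakes.take m.toNat).foldl (fun cnt p =>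
        if 0 < p then PySem.List.pySetD cnt p (PySem.List.pyGetD cnt p 0 + 1) else cnt)
        (List.replicate (combo.toList.length + 1) (0 : Int)) := by
    rw [← hconv, List.foldl_map]
  have hrepl : (List.replicate (combo.toList.length + 1) (0 : Int)).length
      = combo.toList.length + 1 := by simp
  have hcl := pv_B_count_len combo.toList.length (mistakes.take m.toNat) _ hrepl
  rw [← hcntconv] at hcl
  have hcg : ∀ q : Int, 0 ≤ q → q ≤ (combo.toList.length : Int) →
      PySem.List.pyGetD ((PySem.List.pyRange 0 m 1).foldl (fun cnt i =>
        if 0 < PySem.List.pyGetD mistakes i 0 then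
          PySem.List.pySetD cnt (PySem.List.pyGetD mistakes i 0)
            (PySem.List.pyGetD cnt (PySem.List.pyGetD mistakes i 0) 0 + 1)
        else cnt) (List.replicate (combo.toList.length + 1) (0 : Int))) q 0
      = ((mistakes.take m.toNat).countP (fun p => decide (p = q ∧ 0 < p)) : Int) := by
    intro q hq0 hqL
    have hget0 : PySem.List.pyGetD (List.replicate (combo.toList.length + 1) (0 : Int)) q 0 = 0 := by
      rw [PySem.List.pyGetD_eq_getElem (List.replicate (combo.toList.length + 1) (0 : Int)) 0 hq0
        (by rw [List.length_replicate]; push_cast; omega)]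
      simp
    rw [hcntconv,
      pv_B_count_getD combo.toList.length (mistakes.take m.toNat) _ hrepl q hq0 hqL hmk, hget0]
    ring
  have hsum0 : ((PySem.List.pyRange 0 m 1).foldl (fun cnt i =>
        if 0 < PySem.List.pyGetD mistakes i 0 then
          PySem.List.pySetD cnt (PySem.List.pyGetD mistakes i 0)
            (PySem.List.pyGetD cnt (PySem.List.pyGetD mistakes i 0) 0 + 1)
        else cnt) (List.replicate (combo.toList.length + 1) (0 : Int))).sum
      = ((mistakes.take m.toNat).countP (fun p => decide (0 < p)) : Int) := by
    rw [hcntconv, pv_B_count_sum combo.toList.length (mistakes.take m.toNat) _ hrepl hmk]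
    simp
  have hinv := pv_B_inv combo.toList (mistakes.take m.toNat) _ hcl hcg hsum0
    combo.toList.length (le_refl _)
  obtain ⟨_, hBkeys, hBval⟩ := hinv
  rw [List.take_length] at hBkeys
  -- assemble
  apply pv_dict_eq
  · rw [hAkeys, hBkeys]
  · rw [hAkeys]
    exact PySem.Set.nodup_ofList _
  · intro c
    rw [hAval c, hBval c]
    rfl
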